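-- pv_equiv track=rewrite | github.com/justinmvail/glossy | font_scraper/stroke_merge.py | _build_cluster_endpoint_map
-- ===== SOURCE A (Python) =====
-- from collections import defaultdict
--
-- def endpoint_cluster(stroke: list[tuple], from_end: bool, assigned: list[set]) -> int:
--     """Find which junction cluster contains a stroke endpoint.
--
--     Checks if the specified endpoint of a stroke lies within any of the
--     assigned junction clusters, with a small tolerance for nearby pixels.
--
--     Args:
--         stroke: List of (x, y) coordinate tuples.
--         from_end: If True, check the last point; if False, check the first.
--         assigned: List of sets, where each set contains (x, y) integer tuples
--             representing pixels in a junction cluster.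
--
--     Returns:
--         The index of the cluster containing the endpoint (0-indexed), or -1
--         if the endpoint is not in any cluster.
--
--     Note:
--         The function checks the exact pixel position and all 8 neighboring
--         pixels (3x3 neighborhood) to handle slight misalignments between
--         stroke endpoints and cluster centers.
--     """
--     if not stroke:
--         return -1
--
--     pt = stroke[-1] if from_end else stroke[0]
--     if isinstance(pt, (list, tuple)):
--         pt_int = (int(round(pt[0])), int(round(pt[1])))
--     else:
--         pt_int = pt
--
--     for i, cluster in enumerate(assigned):
--         if pt_int in cluster:
--             return i
--         # Check nearby
--         for dx in [-1, 0, 1]: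
--             for dy in [-1, 0, 1]:
--                 if (pt_int[0] + dx, pt_int[1] + dy) in cluster:
--                     return i
--     return -1
--
-- def _build_cluster_endpoint_map(strokes: list[list[tuple]],
--                                  assigned: list[set],
--                                  cluster_cache: dict = None) -> dict[int, list[tuple]]:
--     """Build a mapping from cluster indices to stroke endpoints.
--
--     Args:
--         strokes: List of stroke paths.
--         assigned: List of junction cluster sets.
--         cluster_cache: Optional dict to populate with (stroke_idx, from_end) -> cluster_id.
--             If provided, will be filled during the map building to avoid redundant lookups.
--
--     Returns:
--         Dict mapping cluster index to list of (stroke_index, 'start'/'end') tuples.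
--     """
--     cluster_map = defaultdict(list)
--     for si, s in enumerate(strokes):
--         sc = endpoint_cluster(s, False, assigned)
--         ec = endpoint_cluster(s, True, assigned)
--         if cluster_cache is not None:
--             cluster_cache[(si, False)] = sc
--             cluster_cache[(si, True)] = ec
--         if sc >= 0:
--             cluster_map[sc].append((si, 'start'))
--         if ec >= 0:
--             cluster_map[ec].append((si, 'end'))
--     return cluster_map
-- ===== SOURCE B (Python) =====
-- def _build_cluster_endpoint_map(strokes: list[list[tuple]],
--                                 assigned: list[set],
--                                 cluster_cache: dict = None) -> dict:
--     # Staged alternative: (1) precompute pixel -> smallest cluster index once,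
--     # (2) emit a flat (cluster, endpoint) event list with 9 dict lookups per
--     # endpoint, (3) group the events by cluster in first-appearance key order.
--     first = {}
--     for i, cluster in enumerate(assigned):
--         for p in cluster:
--             first.setdefault(p, i)
--
--     def lookup(stroke, from_end):
--         if not stroke:
--             return -1
--         pt = stroke[-1] if from_end else stroke[0]
--         if isinstance(pt, (list, tuple)):
--             x, y = int(round(pt[0])), int(round(pt[1]))
--         else:
--             x, y = pt
--         return min((first[(x + dx, y + dy)]
--                     for dx in (-1, 0, 1) for dy in (-1, 0, 1)
--                     if (x + dx, y + dy) in first), default=-1)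
--
--     events = []
--     for si, s in enumerate(strokes):
--         sc = lookup(s, False)
--         ec = lookup(s, True)
--         if cluster_cache is not None:
--             cluster_cache[(si, False)] = sc
--             cluster_cache[(si, True)] = ec
--         if sc >= 0:
--             events.append((sc, (si, 'start')))
--         if ec >= 0:
--             events.append((ec, (si, 'end')))
--
--     keys = []
--     for c, _ in events:
--         if c not in keys:
--             keys.append(c)
--     return {c: [e for k, e in events if k == c] for c in keys}
-- ===== Notes on version B (the rewrite author's own statement) =====
-- stated objective: alternative
-- what changed: B replaces A's per-endpoint scan over the cluster list and A's incremental dict-of-lists accumulation with three staged passes: a one-time pixel->smallest-cluster-index dict, a flat (cluster, endpoint) event list resolved by 9 lookups per endpoint, and a final group-by of the events in first-appearance key order.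
import Mathlib
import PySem

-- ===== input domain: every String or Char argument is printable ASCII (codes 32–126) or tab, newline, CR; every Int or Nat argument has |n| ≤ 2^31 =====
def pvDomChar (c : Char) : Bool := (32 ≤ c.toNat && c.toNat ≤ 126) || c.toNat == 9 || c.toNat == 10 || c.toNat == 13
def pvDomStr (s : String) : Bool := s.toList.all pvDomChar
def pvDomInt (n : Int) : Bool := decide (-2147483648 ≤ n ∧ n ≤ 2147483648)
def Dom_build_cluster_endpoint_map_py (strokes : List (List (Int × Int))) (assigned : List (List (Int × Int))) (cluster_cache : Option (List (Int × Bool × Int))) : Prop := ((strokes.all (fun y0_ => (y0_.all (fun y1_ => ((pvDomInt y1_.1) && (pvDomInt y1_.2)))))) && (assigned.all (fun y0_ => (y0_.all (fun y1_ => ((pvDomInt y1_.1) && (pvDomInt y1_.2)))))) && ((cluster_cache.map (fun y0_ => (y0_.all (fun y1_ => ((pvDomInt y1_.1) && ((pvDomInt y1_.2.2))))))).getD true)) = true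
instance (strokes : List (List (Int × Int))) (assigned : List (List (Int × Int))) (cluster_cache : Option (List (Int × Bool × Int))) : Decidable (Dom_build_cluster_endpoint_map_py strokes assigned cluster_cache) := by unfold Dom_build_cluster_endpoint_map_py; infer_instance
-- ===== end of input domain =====

-- ===== PORT A =====
-- B resolves endpoints via one precomputed pixel->smallest-cluster-index dict
-- (9 lookups each) and builds the result in staged passes: a flat event list,
-- then a group-by in first-appearance key order (alternative algorithm, same
-- return value). cluster_cache is only WRITTEN by the Python (identical side
-- effect in A and B); the equivalence proved here is about the return value,
-- which never depends on cluster_cache.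

-- inner 'for i, cluster in enumerate(assigned)' loop of endpoint_cluster
def pvEpLoop (pt : Int × Int) : List (List (Int × Int)) → Int → Int
  | [], _ => -1
  | c :: rest, i =>
    if PySem.Set.contains c pt then i
    else if ([(-1 : Int), 0, 1].any fun dx =>
              [(-1 : Int), 0, 1].any fun dy =>
                PySem.Set.contains c (pt.1 + dx, pt.2 + dy)) then i
    else pvEpLoop pt rest (i + 1)

-- endpoint_cluster; on our Int domain the isinstance/round branch is the
-- identity, so pt_int = pt; the .getD (0,0) is unreachable (stroke ≠ [])
def endpoint_cluster_py (stroke : List (Int × Int)) (from_end : Bool)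
    (assigned : List (List (Int × Int))) : Int :=
  if stroke = [] then -1
  else
    let pt := (if from_end then PySem.List.pyGet? stroke (-1)
               else PySem.List.pyGet? stroke 0).getD (0, 0)
    pvEpLoop pt assigned 0

def build_cluster_endpoint_map_py (strokes : List (List (Int × Int))) (assigned : List (List (Int × Int))) (cluster_cache : Option (List (Int × Bool × Int))) : List (Int × List (Int × String)) :=
  ((PySem.List.enumerate strokes 0).foldl (fun m si_s =>
      let sc := endpoint_cluster_py si_s.2 false assigned
      let ec := endpoint_cluster_py si_s.2 true assigned
      let m := if 0 ≤ sc then m.modify sc [] (· ++ [(si_s.1, "start")]) else m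
      if 0 ≤ ec then m.modify ec [] (· ++ [(si_s.1, "end")]) else m)
    PySem.Dict.empty).items

-- ===== PORT B =====
-- stage 1: 'first.setdefault(p, i)' over 'for i, cluster in enumerate(assigned): for p in cluster'
def pvBuildFirst : List (List (Int × Int)) → Int →
    PySem.Dict (Int × Int) Int → PySem.Dict (Int × Int) Int
  | [], _, d => d
  | c :: rest, i, d => pvBuildFirst rest (i + 1) (c.foldl (fun d p => d.setdefault p i) d)

-- the 3x3 neighborhood generator '(x+dx, y+dy) for dx in (-1,0,1) for dy in (-1,0,1)'
def pvNine (pt : Int × Int) : List (Int × Int) :=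
  [(-1 : Int), 0, 1].flatMap fun dx =>
    [(-1 : Int), 0, 1].map fun dy => (pt.1 + dx, pt.2 + dy)

-- B's local 'lookup'; min(..., default=-1) over the present neighbors
def pvLookup (first : PySem.Dict (Int × Int) Int)
    (stroke : List (Int × Int)) (from_end : Bool) : Int :=
  if stroke = [] then -1
  else
    let pt := (if from_end then PySem.List.pyGet? stroke (-1)
               else PySem.List.pyGet? stroke 0).getD (0, 0)
    PySem.List.minD ((pvNine pt).filterMap (fun q => first.get? q)) (fun v => v) (-1)

def build_cluster_endpoint_map_py_alt (strokes : List (List (Int × Int))) (assigned : List (List (Int × Int))) (cluster_cache : Option (List (Int × Bool × Int))) : List (Int × List (Int × String)) :=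
  let first := pvBuildFirst assigned 0 PySem.Dict.empty
  -- stage 2: flat (cluster, endpoint) event list in emission order
  let events := (PySem.List.enumerate strokes 0).foldl (fun ev si_s =>
      let sc := pvLookup first si_s.2 false
      let ec := pvLookup first si_s.2 true
      let ev := if 0 ≤ sc then ev ++ [(sc, (si_s.1, "start"))] else ev
      if 0 ≤ ec then ev ++ [(ec, (si_s.1, "end"))] else ev)
    ([] : List (Int × (Int × String)))
  -- stage 3: keys in first-appearance order, then one comprehension per key
  let keys := events.foldl (fun ks p => if ks.contains p.1 then ks else ks ++ [p.1]) ([] : List Int)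
  keys.map (fun c => (c, (events.filter (fun p => p.1 == c)).map (·.2)))

-- ===== PRECONDITION & SPEC =====
def Spec_build_cluster_endpoint_map_py (strokes : List (List (Int × Int))) (assigned : List (List (Int × Int))) (cluster_cache : Option (List (Int × Bool × Int))) (out : List (Int × List (Int × String))) : Prop := out = build_cluster_endpoint_map_py_alt strokes assigned cluster_cache
instance (strokes : List (List (Int × Int))) (assigned : List (List (Int × Int))) (cluster_cache : Option (List (Int × Bool × Int))) (out : List (Int × List (Int × String))) : Decidable (Spec_build_cluster_endpoint_map_py strokes assigned cluster_cache out) := by unfold Spec_build_cluster_endpoint_map_py; infer_instance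

-- ===== CLAIM (what is proved, stated in full; the proofs are below) =====
def Claim_equal_build_cluster_endpoint_map_py : Prop := ∀ (strokes : List (List (Int × Int))) (assigned : List (List (Int × Int))) (cluster_cache : Option (List (Int × Bool × Int))), Dom_build_cluster_endpoint_map_py strokes assigned cluster_cache → Spec_build_cluster_endpoint_map_py strokes assigned cluster_cache (build_cluster_endpoint_map_py strokes assigned cluster_cache)

-- ===== LEMMAS AND PROOFS =====

theorem pvGet?_setdefault (d : PySem.Dict (Int×Int) Int) (p q : Int×Int) (i : Int) :
    (d.setdefault p i).get? q = (d.get? q).or (if p == q then some i else none) := by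
  by_cases h : p = q
  · subst h
    rw [PySem.Dict.get?_setdefault_self]
    cases d.get? p <;> simp
  · rw [PySem.Dict.get?_setdefault_of_ne d i (Ne.symm h)]
    simp [h]

theorem pvGet?_foldl_setdefault (c : List (Int × Int)) (i : Int)
    (d : PySem.Dict (Int × Int) Int) (q : Int × Int) :
    ((c.foldl (fun d p => d.setdefault p i) d).get? q)
      = (d.get? q).or (if c.contains q then some i else none) := by
  induction c generalizing d with
  | nil => simp
  | cons p ps ih =>
    rw [List.foldl_cons, ih, pvGet?_setdefault, Option.or_assoc]
    congr 1
    by_cases h : p = q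
    · simp [h]
    · by_cases h2 : q ∈ ps <;> simp [h, h2, Ne.symm h]

theorem pvGet?_buildFirst (cs : List (List (Int × Int))) (i : Int)
    (d : PySem.Dict (Int × Int) Int) (q : Int × Int) :
    (pvBuildFirst cs i d).get? q
      = (d.get? q).or ((cs.findIdx? (fun c => c.contains q)).map (fun k => i + (k : Int))) := by
  induction cs generalizing i d with
  | nil => simp [pvBuildFirst]
  | cons c rest ih =>
    rw [pvBuildFirst, ih, pvGet?_foldl_setdefault, Option.or_assoc, List.findIdx?_cons]
    congr 1
    by_cases h : q ∈ c
    · simp [h]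
    · have h' : c.contains q = false := by simpa using h
      rw [h']
      simp only [Bool.false_eq_true, if_false]
      cases List.findIdx? (fun c => c.contains q) rest <;> simp
      omega

theorem pvHit_iff (pt : Int × Int) (c : List (Int × Int)) :
    (PySem.Set.contains c pt = true ∨ ([(-1 : Int), 0, 1].any fun dx =>
        [(-1 : Int), 0, 1].any fun dy => PySem.Set.contains c (pt.1 + dx, pt.2 + dy)) = true)
      ↔ ((pvNine pt).any (fun q => c.contains q) = true) := by
  simp [pvNine, PySem.Set.contains]
  tauto

theorem pvEpLoop_eq_findIdx? (pt : Int × Int) (cs : List (List (Int × Int))) (i : Int) :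
    pvEpLoop pt cs i
      = match cs.findIdx? (fun c => (pvNine pt).any (fun q => c.contains q)) with
        | none => -1
        | some k => i + (k : Int) := by
  induction cs generalizing i with
  | nil => simp [pvEpLoop]
  | cons c rest ih =>
    rw [pvEpLoop, List.findIdx?_cons]
    by_cases h : ((pvNine pt).any fun q => c.contains q) = true
    · rw [if_pos h]
      rcases (pvHit_iff pt c).mpr h with h3 | h3
      · rw [if_pos h3]; simp
      · by_cases h4 : PySem.Set.contains c pt = true
        · rw [if_pos h4]; simp
        · rw [if_neg h4, if_pos h3]; simp
    · have h5 : ¬ _ ∧ ¬ _ := not_or.mp (fun o => h ((pvHit_iff pt c).mp o))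
      rw [if_neg h5.1, if_neg h5.2, ih, if_neg h]
      cases List.findIdx? (fun c => (pvNine pt).any fun q => c.contains q) rest <;> simp
      ring

theorem pvFoldlMinAdd (t : List Int) (x : Int) :
    (t.map (fun v => v + 1)).foldl min (x + 1) = t.foldl min x + 1 := by
  induction t generalizing x with
  | nil => simp
  | cons a t ih =>
    rw [List.map_cons, List.foldl_cons, List.foldl_cons, min_add_add_right]
    exact ih (min x a)

theorem pvMin?_map_add_one (l : List Int) :
    PySem.List.min? (l.map (fun x => x + 1)) (fun v => v)
      = (PySem.List.min? l (fun v => v)).map (fun x => x + 1) := by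
  cases l with
  | nil => rfl
  | cons x t =>
    rw [List.map_cons, PySem.List.min?_id_cons, PySem.List.min?_id_cons, pvFoldlMinAdd]
    rfl

theorem pvMin?_zero (l : List Int) (h0 : (0 : Int) ∈ l) (hnn : ∀ x ∈ l, 0 ≤ x) :
    PySem.List.min? l (fun v => v) = some 0 := by
  rcases hm : PySem.List.min? l (fun v => v) with _ | m
  · rw [(PySem.List.min?_eq_none_iff l _).mp hm] at h0
    simp at h0
  · have h1 := PySem.List.min?_isMin hm 0 h0
    have h2 := hnn m (PySem.List.min?_mem hm)
    simp [show m = 0 by omega]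

def pvR (N : List (Int × Int)) (cs : List (List (Int × Int))) : List Int :=
  N.filterMap (fun q => ((cs.findIdx? (fun c => c.contains q)).map (fun k => (k : Int))))

theorem pvR_nonneg (N : List (Int × Int)) (cs : List (List (Int × Int))) :
    ∀ x ∈ pvR N cs, (0 : Int) ≤ x := by
  intro x hx
  rcases List.mem_filterMap.mp hx with ⟨q, _, hq⟩
  rcases hfi : cs.findIdx? (fun c => c.contains q) with _ | a
  · rw [hfi] at hq
    simp at hq
  · rw [hfi] at hq
    simp at hq
    omega

theorem pvMin_filterMap_eq (N : List (Int × Int)) (cs : List (List (Int × Int))) :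
    PySem.List.minD (pvR N cs) (fun v => v) (-1)
      = match cs.findIdx? (fun c => N.any (fun q => c.contains q)) with
        | none => -1
        | some k => (k : Int) := by
  induction cs with
  | nil => simp [pvR, PySem.List.minD, PySem.List.min?]
  | cons c rest ih =>
    by_cases h : N.any (fun q => c.contains q) = true
    · rw [List.findIdx?_cons, if_pos h]
      rcases List.any_eq_true.mp h with ⟨q0, hq0, hc0⟩
      have h0 : (0 : Int) ∈ pvR N (c :: rest) := by
        refine List.mem_filterMap.mpr ⟨q0, hq0, ?_⟩
        rw [List.findIdx?_cons, if_pos hc0]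
        rfl
      rw [PySem.List.minD, pvMin?_zero _ h0 (pvR_nonneg N (c :: rest))]
      rfl
    · have hc' : (N.any (fun q => c.contains q)) = false := by simpa using h
      have hall : ∀ q ∈ N, c.contains q = false := by
        intro q hq
        by_contra hc
        exact h (List.any_eq_true.mpr ⟨q, hq, by simpa using hc⟩)
      have hmap : pvR N (c :: rest) = (pvR N rest).map (fun x => x + 1) := by
        rw [pvR, pvR, List.map_filterMap]
        refine List.filterMap_congr (fun q hq => ?_)
        rw [List.findIdx?_cons, hall q hq]
        cases List.findIdx? (fun c => c.contains q) rest <;> simp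
      rw [List.findIdx?_cons, hc', hmap]
      simp only [Bool.false_eq_true, if_false]
      rw [PySem.List.minD, pvMin?_map_add_one]
      rcases hm : PySem.List.min? (pvR N rest) (fun v => v) with _ | m
      · have hN : pvR N rest = [] := (PySem.List.min?_eq_none_iff _ _).mp hm
        have hforall := List.filterMap_eq_nil_iff.mp hN
        have hfi : List.findIdx? (fun c => N.any (fun q => c.contains q)) rest = none := by
          rw [List.findIdx?_eq_none_iff]
          intro cc hcc
          rw [List.any_eq_false]
          intro q hq
          have h2 : List.findIdx? (fun c => c.contains q) rest = none := by
            have h3 := hforall q hq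
            rcases hfi2 : List.findIdx? (fun c => c.contains q) rest with _ | a
            · exact hfi2
            · rw [hfi2] at h3
              simp at h3
          simpa using List.findIdx?_eq_none_iff.mp h2 cc hcc
        rw [hfi]
        rfl
      · have hm0 : 0 ≤ m := pvR_nonneg N rest m (PySem.List.min?_mem hm)
        rw [PySem.List.minD, hm] at ih
        rcases hfi : List.findIdx? (fun c => N.any (fun q => c.contains q)) rest with _ | k
        · rw [hfi] at ih
          simp at ih
          omega
        · rw [hfi] at ih
          simp only [Option.getD_some] at ih
          rw [hfi]
          simp [ih]

theorem pvLookup_eq (assigned : List (List (Int × Int))) (s : List (Int × Int)) (fe : Bool) :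
    pvLookup (pvBuildFirst assigned 0 PySem.Dict.empty) s fe = endpoint_cluster_py s fe assigned := by
  unfold pvLookup endpoint_cluster_py
  by_cases hs : s = []
  · rw [if_pos hs, if_pos hs]
  · rw [if_neg hs, if_neg hs]
    have hget : ∀ q, (pvBuildFirst assigned 0 PySem.Dict.empty).get? q
        = (assigned.findIdx? (fun c => c.contains q)).map (fun k => (k : Int)) := by
      intro q
      rw [pvGet?_buildFirst]
      simp [PySem.Dict.empty, PySem.Dict.get?]
    simp only [hget]
    rw [pvEpLoop_eq_findIdx?]
    have hmin := pvMin_filterMap_eq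
      (pvNine ((if fe then PySem.List.pyGet? s (-1) else PySem.List.pyGet? s 0).getD (0, 0))) assigned
    rw [pvR] at hmin
    rw [hmin]
    cases List.findIdx? (fun c =>
      (pvNine ((if fe then PySem.List.pyGet? s (-1) else PySem.List.pyGet? s 0).getD (0, 0))).any
        fun q => c.contains q) assigned <;> simp

-- the (0–2)-element event list a single stroke contributes
def pvG (first : PySem.Dict (Int × Int) Int) (x : Int × List (Int × Int)) :
    List (Int × (Int × String)) :=
  (if 0 ≤ pvLookup first x.2 false then [(pvLookup first x.2 false, (x.1, "start"))] else []) ++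
  (if 0 ≤ pvLookup first x.2 true then [(pvLookup first x.2 true, (x.1, "end"))] else [])

theorem pvEvents_eq_flatMap (first : PySem.Dict (Int × Int) Int)
    (l : List (Int × List (Int × Int))) (ev : List (Int × (Int × String))) :
    l.foldl (fun ev si_s =>
      let sc := pvLookup first si_s.2 false
      let ec := pvLookup first si_s.2 true
      let ev := if 0 ≤ sc then ev ++ [(sc, (si_s.1, "start"))] else ev
      if 0 ≤ ec then ev ++ [(ec, (si_s.1, "end"))] else ev) ev
      = ev ++ l.flatMap (pvG first) := by
  induction l generalizing ev with
  | nil => simp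
  | cons x t ih =>
    rw [List.foldl_cons, ih, List.flatMap_cons]
    simp only [pvG]
    split_ifs <;> simp

theorem pvAfold_eq_events (first : PySem.Dict (Int × Int) Int)
    (l : List (Int × List (Int × Int))) (d : PySem.Dict Int (List (Int × String))) :
    l.foldl (fun m si_s =>
      let sc := pvLookup first si_s.2 false
      let ec := pvLookup first si_s.2 true
      let m := if 0 ≤ sc then m.modify sc [] (· ++ [(si_s.1, "start")]) else m
      if 0 ≤ ec then m.modify ec [] (· ++ [(si_s.1, "end")]) else m) d
      = (l.flatMap (pvG first)).foldl (fun m p => m.modify p.1 [] (· ++ [p.2])) d := by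
  induction l generalizing d with
  | nil => simp
  | cons x t ih =>
    rw [List.foldl_cons, List.flatMap_cons, List.foldl_append, ih]
    congr 1
    simp only [pvG]
    split_ifs <;> simp

theorem pvKeysFold_eq_update (l : List (Int × (Int × String))) (ks : List Int) :
    l.foldl (fun ks p => if ks.contains p.1 then ks else ks ++ [p.1]) ks
      = PySem.Set.update ks (l.map (·.1)) := by
  induction l generalizing ks with
  | nil => simp [PySem.Set.update]
  | cons x t ih =>
    rw [List.foldl_cons, ih]
    simp [PySem.Set.update, PySem.Set.add, PySem.Set.contains]

-- ===== VERDICT (by name: the statement is the Claim_ definition above) =====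
theorem build_cluster_endpoint_map_py_spec : Claim_equal_build_cluster_endpoint_map_py := by
  intro strokes assigned cluster_cache _
  unfold Spec_build_cluster_endpoint_map_py
  unfold build_cluster_endpoint_map_py build_cluster_endpoint_map_py_alt
  simp only [← pvLookup_eq assigned]
  rw [pvAfold_eq_events, pvEvents_eq_flatMap, pvKeysFold_eq_update]
  set first := pvBuildFirst assigned 0 PySem.Dict.empty
  set ev := (PySem.List.enumerate strokes 0).flatMap (pvG first) with hev
  simp only [List.nil_append]
  have hnd : ((ev.foldl (fun m p => m.modify p.1 [] (· ++ [p.2])) PySem.Dict.empty)).keys.Nodup :=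
    PySem.Dict.nodup_keys_foldl_modify_key ev (·.1) [] (fun _ p => (· ++ [p.2])) PySem.Dict.empty
      (by simp [PySem.Dict.keys_empty])
  rw [PySem.Dict.items_eq_map_keys _ hnd []]
  rw [PySem.Dict.keys_foldl_modify_key]
  simp only [PySem.Dict.getD_foldl_modify_append, PySem.Dict.getD_empty, List.nil_append,
    PySem.Dict.keys_empty]
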